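-- pv_equiv track=rewrite | github.com/vytermelon/Munich-football | mystats/stats/views.py | rec
-- ===== SOURCE A (Python) =====
-- def rec(a, i):
--     if i >= len(a) - 1:
--         return
--     temp = []
--     for j in range(i + 1, len(a)):
--         temp.append([a[i], a[j]])
--
--     val = rec(a, i + 1)
--     if val:
--         temp.extend(val)
--     return temp
-- ===== SOURCE B (Python) =====
-- def rec(a, i):
--     # Iterative comprehension instead of recursion; None on the degenerate guard like A.
--     if i >= len(a) - 1:
--         return None
--     return [[a[x], a[j]] for x in range(i, len(a) - 1) for j in range(x + 1, len(a))]
-- ===== Notes on version B (the rewrite author's own statement) =====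
-- stated objective: idiomatic
-- what changed: Replaced the self-recursion (build current row, recurse, extend) by a single flat nested-range list comprehension over all index pairs, with the same None guard.
import Mathlib
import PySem

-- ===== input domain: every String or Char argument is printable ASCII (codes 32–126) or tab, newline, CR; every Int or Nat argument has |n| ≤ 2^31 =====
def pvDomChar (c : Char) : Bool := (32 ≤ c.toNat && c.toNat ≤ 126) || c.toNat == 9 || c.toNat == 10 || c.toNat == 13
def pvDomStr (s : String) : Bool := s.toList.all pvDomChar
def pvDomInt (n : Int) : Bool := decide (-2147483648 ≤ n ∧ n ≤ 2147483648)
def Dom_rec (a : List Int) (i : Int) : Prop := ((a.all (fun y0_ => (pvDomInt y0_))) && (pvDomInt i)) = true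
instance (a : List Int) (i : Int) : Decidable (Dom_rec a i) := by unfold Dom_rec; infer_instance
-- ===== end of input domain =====

-- B replaces A's self-recursion by a single flat nested-range list comprehension (idiomatic; same cost).

-- ===== PORT A =====
def rec (a : List Int) (i : Int) : Option (List (List Int)) :=
  if (a.length : Int) - 1 ≤ i then none
  else
    let temp := (PySem.List.pyRange (i + 1) a.length 1).foldl
      (fun acc j => acc ++ [[PySem.List.pyGetD a i 0, PySem.List.pyGetD a j 0]]) []
    let val := rec a (i + 1)
    some (match val with
      | some v => if v.isEmpty then temp else temp ++ v
      | none => temp)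
termination_by ((a.length : Int) - 1 - i).toNat
decreasing_by omega

-- ===== PORT B =====
def rec_alt (a : List Int) (i : Int) : Option (List (List Int)) :=
  if (a.length : Int) - 1 ≤ i then none
  else
    some ((PySem.List.pyRange i ((a.length : Int) - 1) 1).flatMap
      (fun x => (PySem.List.pyRange (x + 1) a.length 1).map
        (fun j => [PySem.List.pyGetD a x 0, PySem.List.pyGetD a j 0])))

-- ===== PRECONDITION & SPEC =====
-- Pre_ excludes exactly the inputs where A raises IndexError: i < -len(a) with the guard not taken.
def Pre_rec (a : List Int) (i : Int) : Prop :=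
  (a.length : Int) - 1 ≤ i ∨ -(a.length : Int) ≤ i
instance (a : List Int) (i : Int) : Decidable (Pre_rec a i) := by unfold Pre_rec; infer_instance
def pvWitness_rec : List Int × Int := ([1, 2, 3], 0)
def Spec_rec (a : List Int) (i : Int) (out : Option (List (List Int))) : Prop := out = rec_alt a i
instance (a : List Int) (i : Int) (out : Option (List (List Int))) : Decidable (Spec_rec a i out) := by unfold Spec_rec; infer_instance

-- ===== CLAIM (what is proved, stated in full; the proofs are below) =====
def Claim_equal_rec : Prop := ∀ (a : List Int) (i : Int), Dom_rec a i → Pre_rec a i → Spec_rec a i (rec a i)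

-- ===== LEMMAS AND PROOFS =====

-- one pair row of B's comprehension
def pvRow (a : List Int) (x : Int) : List (List Int) :=
  (PySem.List.pyRange (x + 1) a.length 1).map
    (fun j => [PySem.List.pyGetD a x 0, PySem.List.pyGetD a j 0])

lemma rec_alt_flat (a : List Int) (i : Int) (h : ¬ (a.length : Int) - 1 ≤ i) :
    rec_alt a i = some ((PySem.List.pyRange i ((a.length : Int) - 1) 1).flatMap (pvRow a)) := by
  rw [rec_alt, if_neg h]; rfl

lemma temp_eq_row (a : List Int) (i : Int) :
    (PySem.List.pyRange (i + 1) a.length 1).foldl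
      (fun acc j => acc ++ [[PySem.List.pyGetD a i 0, PySem.List.pyGetD a j 0]]) []
    = pvRow a i := by
  simpa [pvRow] using
    (PySem.List.foldl_append_singleton_eq_map
      (l := PySem.List.pyRange (i + 1) a.length 1)
      (f := fun j => [PySem.List.pyGetD a i 0, PySem.List.pyGetD a j 0]) (acc := []))

lemma rec_eq_alt_fuel (a : List Int) :
    ∀ (n : Nat) (i : Int), ((a.length : Int) - 1 - i).toNat ≤ n → rec a i = rec_alt a i := by
  intro n
  induction n with
  | zero =>
    intro i hle
    have h : (a.length : Int) - 1 ≤ i := by omega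
    rw [rec, rec_alt]
    simp [h]
  | succ n ih =>
    intro i hle
    by_cases h : (a.length : Int) - 1 ≤ i
    · rw [rec, rec_alt]; simp [h]
    · have hrec : rec a (i + 1) = rec_alt a (i + 1) := ih (i + 1) (by omega)
      rw [rec]
      simp only [h, if_false]
      rw [temp_eq_row, hrec, rec_alt_flat a i h,
        PySem.List.pyRange_one_cons (by omega : i < (a.length : Int) - 1)]
      by_cases h2 : (a.length : Int) - 1 ≤ i + 1
      · rw [rec_alt]
        simp [h2, PySem.List.pyRange_one_eq_nil (show (a.length : Int) - 1 ≤ i + 1 from h2)]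
      · rw [rec_alt_flat a (i + 1) h2]
        simp only [List.flatMap_cons, Option.some.injEq]
        by_cases hv : ((PySem.List.pyRange (i + 1) ((a.length : Int) - 1) 1).flatMap (pvRow a)).isEmpty
        · simp_all [List.isEmpty_iff]
        · simp [hv]

-- ===== VERDICT (by name: the statement is the Claim_ definition above) =====
theorem rec_spec : Claim_equal_rec := by
  intro a i _ _
  unfold Spec_rec
  exact rec_eq_alt_fuel a ((a.length : Int) - 1 - i).toNat i le_rfl
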